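-- pv_equiv track=rewrite | github.com/qqweqwqweqwe/programmers | pccp-2/20230115_pccp2번.py | solution
-- ===== SOURCE A (Python) =====
-- from queue import PriorityQueue
--
-- def solution(ability:list, number:int):
--   answer = 0
--   Que=PriorityQueue()
--   while ability:
--     Que.put(ability.pop())
--
--   for i in range(number):
--     first,second=Que.get(), Que.get()
--     first,second=first+second,first+second
--     Que.put(first)
--     Que.put(second)
--
--   while not Que.empty():
--     answer+=Que.get()
--
--
--   return answer
-- ===== SOURCE B (Python) =====
-- def _insort(vals, x):
--     # insert x into the ascending list vals, keeping it ascending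
--     i = 0
--     while i < len(vals) and vals[i] <= x:
--         i += 1
--     vals.insert(i, x)
--
-- def solution(ability: list, number: int):
--     # keep a plain ascending list instead of a PriorityQueue
--     vals = []
--     while ability:
--         vals.append(ability.pop())
--     vals.sort()
--     for _ in range(number):
--         a = vals.pop(0)
--         b = vals.pop(0)
--         s = a + b
--         _insort(vals, s)
--         _insort(vals, s)
--     return sum(vals)
-- ===== Notes on version B (the rewrite author's own statement) =====
-- stated objective: alternative
-- what changed: Replaces the PriorityQueue with a plain ascending list kept sorted by hand (sort once, pop the two front elements, linear-insert the doubled sum twice, sum at the end) in place of heap put/get; Pre_ excludes inputs where number > 0 and len(ability) < 2, on which A blocks forever on Que.get() while B raises IndexError.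
import Mathlib
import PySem

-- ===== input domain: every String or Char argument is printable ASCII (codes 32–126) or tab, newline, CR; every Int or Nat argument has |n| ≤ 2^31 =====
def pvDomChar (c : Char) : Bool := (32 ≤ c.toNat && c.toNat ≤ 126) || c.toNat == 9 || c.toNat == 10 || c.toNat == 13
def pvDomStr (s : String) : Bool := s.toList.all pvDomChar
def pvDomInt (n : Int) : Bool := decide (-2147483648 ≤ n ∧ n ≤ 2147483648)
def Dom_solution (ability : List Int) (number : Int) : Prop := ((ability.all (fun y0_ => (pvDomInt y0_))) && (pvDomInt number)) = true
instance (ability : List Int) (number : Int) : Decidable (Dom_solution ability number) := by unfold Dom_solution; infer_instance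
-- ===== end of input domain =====

-- B replaces A's PriorityQueue by a plain ascending list (sort once, pop two front, linear-insert
-- the doubled sum twice, sum at the end): an alternative data structure, same return value.
-- Both A and B empty the `ability` argument in place; the equivalence proved is about the return value.


-- ===== PORT A =====
-- The PriorityQueue holds Ints only, so its observable behaviour is exactly: `put` adds the value
-- to the multiset, `get` removes and returns the minimum value. We model the queue's contents as a
-- List Int; `get` is PySem.List.min? followed by erasing one occurrence of that value (exact as a
-- multiset of Ints). When the queue is empty, Python's Que.get() BLOCKS FOREVER; those inputs are
-- excluded by Pre_solution and the port returns a junk (0, []) there.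
def pqGet (q : List Int) : Int × List Int :=
  match PySem.List.min? q (fun x => x) with
  | none => (0, [])           -- unreachable inside Pre_solution: Que.get() blocks forever here
  | some m => (m, q.erase m)

-- for i in range(number): pop two minima, put their sum back twice
def aLoop : Nat → List Int → List Int
  | 0, q => q
  | n+1, q =>
    let fq := pqGet q
    let sq := pqGet fq.2
    let s := fq.1 + sq.1
    aLoop n ((sq.2 ++ [s]) ++ [s])

-- while not Que.empty(): answer += Que.get()
def aDrain (q : List Int) (acc : Int) : Int :=
  match h : PySem.List.min? q (fun x => x) with
  | none => acc
  | some m => aDrain (q.erase m) (acc + m)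
termination_by q.length
decreasing_by
  have hm : m ∈ q := PySem.List.min?_mem h
  have := List.length_erase_of_mem hm
  have : 0 < q.length := List.length_pos_of_mem hm
  omega

def solution (ability : List Int) (number : Int) : Int :=
  -- while ability: Que.put(ability.pop())  → the queue's multiset is ability reversed
  aDrain (aLoop number.toNat ability.reverse) 0

-- ===== PORT B =====
-- hand-written _insort: walk past the elements ≤ x, insert x there
def insortB (x : Int) : List Int → List Int
  | [] => [x]
  | y :: t => if y ≤ x then y :: insortB x t else x :: y :: t

def bLoop : Nat → List Int → List Int
  | 0, v => v
  | n+1, v =>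
    match v with
    | a :: b :: rest => bLoop n (insortB (a + b) (insortB (a + b) rest))
    | _ => []               -- Python raises IndexError here; excluded by Pre_solution

def solution_alt (ability : List Int) (number : Int) : Int :=
  (bLoop number.toNat (PySem.List.sorted ability.reverse (fun x => x) false)).sum

-- ===== PRECONDITION & SPEC =====
-- Pre_ excludes exactly the inputs with number > 0 and fewer than two abilities, on which A blocks
-- forever on Que.get() (it never returns) and B raises IndexError.
def Pre_solution (ability : List Int) (number : Int) : Prop := 0 < number → 2 ≤ ability.length
instance (ability : List Int) (number : Int) : Decidable (Pre_solution ability number) := by unfold Pre_solution; infer_instance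
def pvWitness_solution : List Int × Int := ([3, 1, 2], 2)

def Spec_solution (ability : List Int) (number : Int) (out : Int) : Prop := out = solution_alt ability number
instance (ability : List Int) (number : Int) (out : Int) : Decidable (Spec_solution ability number out) := by unfold Spec_solution; infer_instance

-- ===== CLAIM (what is proved, stated in full; the proofs are below) =====
def Claim_equal_solution : Prop := ∀ (ability : List Int) (number : Int), Dom_solution ability number → Pre_solution ability number → Spec_solution ability number (solution ability number)

-- ===== LEMMAS AND PROOFS =====

theorem insortB_perm (x : Int) (v : List Int) : (insortB x v).Perm (x :: v) := by
  induction v with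
  | nil => simp [insortB]
  | cons y t ih =>
    simp only [insortB]
    split
    · exact (ih.cons y).trans (List.Perm.swap x y t)
    · exact List.Perm.refl _

theorem insortB_sorted (x : Int) (v : List Int) (hv : v.Pairwise (· ≤ ·)) :
    (insortB x v).Pairwise (· ≤ ·) := by
  induction v with
  | nil => simp [insortB]
  | cons y t ih =>
    rw [List.pairwise_cons] at hv
    simp only [insortB]
    split
    · rename_i hyx
      rw [List.pairwise_cons]
      refine ⟨fun z hz => ?_, ih hv.2⟩
      rcases List.mem_cons.mp ((insortB_perm x t).mem_iff.mp hz) with h | h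
      · exact h ▸ hyx
      · exact hv.1 z h
    · rename_i hyx
      rw [List.pairwise_cons]
      refine ⟨fun z hz => ?_, List.pairwise_cons.mpr hv⟩
      rcases List.mem_cons.mp hz with h | h
      · omega
      · exact le_trans (by omega) (hv.1 z h)

-- extract the minimum from q, which is a permutation of the sorted a :: rest
theorem pqGet_of_perm (a : Int) (rest q : List Int)
    (hs : (a :: rest).Pairwise (· ≤ ·)) (hp : (a :: rest).Perm q) :
    pqGet q = (a, q.erase a) ∧ (q.erase a).Perm rest := by
  have haq : a ∈ q := hp.mem_iff.mp (by simp)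
  have hne : q ≠ [] := by intro h; simp [h] at haq
  unfold pqGet
  rcases hmin : PySem.List.min? q (fun x => x) with _ | m
  · exact absurd ((PySem.List.min?_eq_none_iff _ _).mp hmin) hne
  · have hm_mem : m ∈ q := PySem.List.min?_mem hmin
    have hma : m ≤ a := PySem.List.min?_isMin hmin a haq
    have ham : a ≤ m := by
      rcases List.mem_cons.mp (hp.mem_iff.mpr hm_mem) with h | h
      · omega
      · exact (List.pairwise_cons.mp hs).1 m h
    have hma' : m = a := le_antisymm hma ham
    subst hma'
    refine ⟨rfl, ?_⟩
    have h1 : q.Perm (m :: q.erase m) := List.perm_cons_erase haq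
    have h2 : (m :: q.erase m).Perm (m :: rest) := h1.symm.trans hp.symm
    exact (List.Perm.cons_inv h2)

theorem aLoop_perm (n : Nat) (v q : List Int)
    (hs : v.Pairwise (· ≤ ·)) (hp : v.Perm q) (hlen : n = 0 ∨ 2 ≤ v.length) :
    (bLoop n v).Perm (aLoop n q) ∧ (bLoop n v).Pairwise (· ≤ ·) := by
  induction n generalizing v q with
  | zero => exact ⟨hp, hs⟩
  | succ k ih =>
    rcases hlen with h | h
    · omega
    · match v, h with
      | a :: b :: rest, _ =>
        have hget1 := pqGet_of_perm a (b :: rest) q hs hp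
        have hs2 : (b :: rest).Pairwise (· ≤ ·) := (List.pairwise_cons.mp hs).2
        have hget2 := pqGet_of_perm b rest (q.erase a) hs2 hget1.2.symm
        simp only [aLoop, bLoop, hget1.1, hget2.1]
        set s := a + b with hsdef
        have hins1 : (insortB s rest).Perm (s :: rest) := insortB_perm s rest
        have hins2 : (insortB s (insortB s rest)).Perm (s :: s :: rest) :=
          (insortB_perm s _).trans (hins1.cons s)
        have hps : (insortB s (insortB s rest)).Perm ((((q.erase a).erase b) ++ [s]) ++ [s]) := by
          refine hins2.trans ?_
          have : (s :: s :: rest).Perm (rest ++ [s] ++ [s]) := by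
            simpa using (List.perm_append_comm (l₁ := [s, s]) (l₂ := rest)).trans
              (by simp)
          refine this.trans ?_
          exact ((hget2.2.symm.append_right [s]).append_right [s])
        have hsorted : (insortB s (insortB s rest)).Pairwise (· ≤ ·) :=
          insortB_sorted s _ (insortB_sorted s rest (List.pairwise_cons.mp hs2).2)
        have hlen' : k = 0 ∨ 2 ≤ (insortB s (insortB s rest)).length := by
          right
          have := hins2.length_eq
          simp at this; omega
        exact ih _ _ hsorted hps hlen'

theorem aDrain_eq_sum (q : List Int) (acc : Int) : aDrain q acc = acc + q.sum := by
  induction hw : q.length using Nat.strong_induction_on generalizing q acc with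
  | _ n ih =>
    rw [aDrain]
    split
    · rename_i hmin
      simp [(PySem.List.min?_eq_none_iff _ _).mp hmin]
    · rename_i m hmin
      have hm : m ∈ q := PySem.List.min?_mem hmin
      have hlt : (q.erase m).length < n := by
        have := List.length_erase_of_mem hm
        have := List.length_pos_of_mem hm
        omega
      rw [ih _ hlt _ _ rfl]
      have hperm : q.Perm (m :: q.erase m) := List.perm_cons_erase hm
      have := hperm.sum_eq
      simp at this
      omega

-- ===== VERDICT (by name: the statement is the Claim_ definition above) =====
theorem solution_spec : Claim_equal_solution := by
  intro ability number _hdom hpre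
  unfold Spec_solution solution solution_alt
  have hsp : (PySem.List.sorted ability.reverse (fun x => x) false).Perm ability.reverse :=
    PySem.List.sorted_perm _ _ _
  have hss : (PySem.List.sorted ability.reverse (fun x => x) false).Pairwise (· ≤ ·) :=
    PySem.List.sorted_pairwise _ _
  have hlen : number.toNat = 0 ∨ 2 ≤ (PySem.List.sorted ability.reverse (fun x => x) false).length := by
    rcases le_or_gt number 0 with h | h
    · left; omega
    · right
      have hl := hsp.length_eq
      rw [List.length_reverse] at hl
      have h2 := hpre h
      omega
  have hmain := aLoop_perm number.toNat _ ability.reverse hss hsp hlen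
  rw [aDrain_eq_sum, zero_add, hmain.1.sum_eq]
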